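-- pv_equiv track=rewrite | github.com/E-P-T/Homework | PavelPenkovskiy/Task4.7.py | foo
-- ===== SOURCE A (Python) =====
-- def foo(list_of_integers):
--     result_list = []
--     for i in list_of_integers:
--         product = 1
--         for j in list_of_integers:
--             if j == i:
--                 continue
--             else:
--                 product *= j
--         result_list.append(product)
--     return result_list
-- ===== SOURCE B (Python) =====
-- def foo(list_of_integers):
--     # O(n): group equal values into one product each, then prefix/suffix
--     # products over the (few) groups; answer for x = product of all other groups.
--     groups = {}
--     for x in list_of_integers:
--         groups[x] = groups.get(x, 1) * x
--     items = list(groups.items())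
--     n = len(items)
--     suf = [1] * (n + 1)
--     for i in range(n - 1, -1, -1):
--         suf[i] = items[i][1] * suf[i + 1]
--     ans = {}
--     pre = 1
--     for i in range(n):
--         ans[items[i][0]] = pre * suf[i + 1]
--         pre *= items[i][1]
--     return [ans[x] for x in list_of_integers]
-- ===== Notes on version B (the rewrite author's own statement) =====
-- stated objective: faster
-- what changed: Replaces the quadratic all-pairs rescan with one grouping pass (value -> product of its occurrences) plus prefix/suffix products over the distinct groups, mapping each element back to its precomputed answer.
import Mathlib
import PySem

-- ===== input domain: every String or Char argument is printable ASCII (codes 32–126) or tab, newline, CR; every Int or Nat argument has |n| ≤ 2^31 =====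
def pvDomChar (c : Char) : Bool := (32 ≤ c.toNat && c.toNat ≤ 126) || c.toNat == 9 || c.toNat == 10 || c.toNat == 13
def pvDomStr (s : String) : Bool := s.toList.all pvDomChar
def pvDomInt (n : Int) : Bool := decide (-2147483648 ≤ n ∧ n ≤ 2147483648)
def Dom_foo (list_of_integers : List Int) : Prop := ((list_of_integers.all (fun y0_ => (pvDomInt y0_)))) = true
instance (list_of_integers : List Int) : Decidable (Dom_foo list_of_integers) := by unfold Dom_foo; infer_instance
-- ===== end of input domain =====

-- B replaces A's quadratic all-pairs rescan by one grouping pass plus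
-- prefix/suffix products over the distinct groups (O(n) instead of O(n^2)).

-- ===== PORT A =====
def foo (list_of_integers : List Int) : List Int :=
  list_of_integers.foldl
    (fun result_list i =>
      result_list ++
        [list_of_integers.foldl (fun product j => if j == i then product else product * j) 1])
    []

-- ===== PORT B =====
-- groups[x] = groups.get(x, 1) * x, built over the list
def fooGroups (l : List Int) : PySem.Dict Int Int :=
  l.foldl (fun d x => d.insert x (d.getD x 1 * x)) PySem.Dict.empty

-- the suffix-product array suf (built back-to-front, as Source B's backwards loop does)
def fooSufs : List (Int × Int) → List Int
  | [] => [1]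
  | (_, v) :: rest =>
      let s := fooSufs rest
      (v * s.headI) :: s

-- the forward loop: ans[items[i][0]] = pre * suf[i+1]; pre *= items[i][1]
def fooAnsLoop : List (Int × Int) → List Int → Int → PySem.Dict Int Int → PySem.Dict Int Int
  | [], _, _, ans => ans
  | (k, v) :: rest, suf, pre, ans =>
      fooAnsLoop rest suf.tail (pre * v) (ans.insert k (pre * suf.tail.headI))

def foo_alt (list_of_integers : List Int) : List Int :=
  let items := (fooGroups list_of_integers).items
  let ans := fooAnsLoop items (fooSufs items) 1 PySem.Dict.empty
  -- ans[x]: every element of the list is a key of ans, so the default 0 is never read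
  list_of_integers.map (fun x => ans.getD x 0)

-- ===== PRECONDITION & SPEC =====
def Spec_foo (list_of_integers : List Int) (out : List Int) : Prop := out = foo_alt list_of_integers
instance (list_of_integers : List Int) (out : List Int) : Decidable (Spec_foo list_of_integers out) := by unfold Spec_foo; infer_instance

-- ===== CLAIM (what is proved, stated in full; the proofs are below) =====
def Claim_equal_foo : Prop := ∀ (list_of_integers : List Int), Dom_foo list_of_integers → Spec_foo list_of_integers (foo list_of_integers)

-- ===== LEMMAS AND PROOFS =====

-- A's inner loop is the product of the elements different from i
lemma foo_inner (l : List Int) (i : Int) :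
    ∀ acc : Int, l.foldl (fun product j => if j == i then product else product * j) acc
      = acc * (l.filter (fun j => j != i)).prod := by
  induction l with
  | nil => intro acc; simp
  | cons x xs ih =>
      intro acc
      simp only [List.foldl_cons, List.filter_cons]
      by_cases hx : x = i
      · have hb : (x == i) = true := by simp [hx]
        have hbn : (x != i) = false := by simp [hx]
        rw [hb, if_pos rfl, hbn, if_neg (by simp), ih acc]
      · have hb : (x == i) = false := by simp [hx]
        have hbn : (x != i) = true := by simp [hx]
        rw [hb, if_neg (by simp), hbn, if_pos rfl, List.prod_cons, ih (acc * x)]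
        ring

-- A returns, for each element i, the product of the elements ≠ i
lemma foo_eq (l : List Int) :
    foo l = l.map (fun i => (l.filter (fun j => j != i)).prod) := by
  unfold foo
  rw [PySem.List.foldl_append_singleton_eq_map]
  rw [List.nil_append]
  exact List.map_congr_left (fun i _ => by rw [foo_inner l i 1, one_mul])

-- the grouping dict: value at k is the product of the occurrences of k
lemma groups_getD (l : List Int) :
    ∀ (d : PySem.Dict Int Int) (k : Int),
      (l.foldl (fun d x => d.insert x (d.getD x 1 * x)) d).getD k 1
        = d.getD k 1 * (l.filter (fun j => j == k)).prod := by
  induction l with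
  | nil => intro d k; simp
  | cons x xs ih =>
      intro d k
      simp only [List.foldl_cons, ih, List.filter_cons]
      by_cases hk : x = k
      · subst hk; simp [mul_assoc]
      · simp [PySem.Dict.getD_insert, hk, Ne.symm hk]

lemma groups_keys (l : List Int) : (fooGroups l).keys = PySem.Set.ofList l := by
  unfold fooGroups
  rw [PySem.Dict.keys_foldl_insert]
  simp [PySem.Set.update_nil_left]

-- suffix products: the head of fooSufs is the product of all group values
lemma sufs_headI (it : List (Int × Int)) :
    (fooSufs it).headI = (it.map (fun p => p.2)).prod := by
  induction it with
  | nil => simp [fooSufs]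
  | cons p rest ih => obtain ⟨k, v⟩ := p; simp [fooSufs, ih]

-- the forward loop: with nodup keys, ans[k] = pre * product of the other values
lemma ansLoop_getD (it : List (Int × Int)) :
    ∀ (pre : Int) (ans : PySem.Dict Int Int) (k : Int),
      (it.map (fun p => p.1)).Nodup →
      (fooAnsLoop it (fooSufs it) pre ans).getD k 0
        = if k ∈ it.map (fun p => p.1)
          then pre * ((it.filter (fun p => p.1 != k)).map (fun p => p.2)).prod
          else ans.getD k 0 := by
  induction it with
  | nil => intro pre ans k _; simp [fooAnsLoop]
  | cons p rest ih =>
      intro pre ans k hnd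
      obtain ⟨k0, v⟩ := p
      simp only [List.map_cons, List.nodup_cons] at hnd
      obtain ⟨hk0, hndr⟩ := hnd
      show (fooAnsLoop rest (fooSufs ((k0, v) :: rest)).tail (pre * v)
              (ans.insert k0 (pre * (fooSufs ((k0, v) :: rest)).tail.headI))).getD k 0 = _
      have htail : (fooSufs ((k0, v) :: rest)).tail = fooSufs rest := by simp [fooSufs]
      rw [htail, sufs_headI, ih (pre * v) _ k hndr]
      by_cases hkr : k ∈ rest.map (fun p => p.1)
      · have hkne : k ≠ k0 := fun h => hk0 (h ▸ hkr)
        have : ((k0, v) :: rest).filter (fun p => p.1 != k)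
            = (k0, v) :: rest.filter (fun p => p.1 != k) := by
          simp [Ne.symm hkne]
        simp only [List.map_cons, List.mem_cons]
        rw [if_pos hkr, if_pos (Or.inr hkr), this]
        simp [mul_assoc]
      · rw [if_neg hkr]
        by_cases hk : k = k0
        · subst hk
          have hfil : rest.filter (fun p => p.1 != k) = rest := by
            rw [List.filter_eq_self]
            intro p hp
            simp only [bne_iff_ne, ne_eq]
            exact fun h => hk0 (h ▸ List.mem_map_of_mem hp)
          simp [PySem.Dict.getD_insert, hfil]
        · simp [PySem.Dict.getD_insert, hk, hkr]

-- product of the equal part times product of the different part is the whole product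
lemma prod_filter_split (m : List Int) (k : Int) :
    (m.filter (fun j => j == k)).prod * (m.filter (fun j => j != k)).prod = m.prod := by
  have h := (List.filter_append_perm (fun j => j == k) m).prod_eq
  rw [List.prod_append] at h
  simpa [bne] using h

-- covering a list by nodup group keys: group products multiply to the whole product
lemma prod_groups_cover (ks : List Int) :
    ∀ m : List Int, ks.Nodup → (∀ y ∈ m, y ∈ ks) →
      (ks.map (fun k => (m.filter (fun j => j == k)).prod)).prod = m.prod := by
  induction ks with
  | nil =>
      intro m _ hm
      have : m = [] := List.eq_nil_iff_forall_not_mem.mpr (fun a ha => by simpa using hm a ha)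
      simp [this]
  | cons k ks ih =>
      intro m hnd hm
      simp only [List.nodup_cons] at hnd
      obtain ⟨hk, hnd⟩ := hnd
      simp only [List.map_cons, List.prod_cons]
      have hmap : ∀ k' ∈ ks,
          (m.filter (fun j => j == k')).prod
            = ((m.filter (fun j => j != k)).filter (fun j => j == k')).prod := by
        intro k' hk'
        have hne : k' ≠ k := fun h => hk (h ▸ hk')
        congr 1
        rw [List.filter_filter]
        apply List.filter_congr
        intro a _
        by_cases ha : a = k'
        · simp [ha, hne]
        · simp [ha]
      rw [List.map_congr_left hmap, ih (m.filter (fun j => j != k)) hnd ?cov,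
          prod_filter_split]
      case cov =>
        intro y hy
        simp only [List.mem_filter, bne_iff_ne, ne_eq] at hy
        rcases List.mem_cons.mp (hm y hy.1) with h | h
        · exact absurd h hy.2
        · exact h

-- B returns, for each element x, the product of the elements ≠ x
lemma foo_alt_eq (l : List Int) :
    foo_alt l = l.map (fun x => (l.filter (fun j => j != x)).prod) := by
  unfold foo_alt
  apply List.map_congr_left
  intro x hx
  have hkeys : (fooGroups l).keys = PySem.Set.ofList l := groups_keys l
  have hnd : (fooGroups l).keys.Nodup := by rw [hkeys]; exact PySem.Set.nodup_ofList l
  have hitems : (fooGroups l).items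
      = (fooGroups l).keys.map (fun k => (k, (fooGroups l).getD k 1)) :=
    PySem.Dict.items_eq_map_keys _ hnd 1
  have hfst : ((fun p : Int × Int => p.1) ∘ fun k => (k, (fooGroups l).getD k 1)) = id := rfl
  have hndk : ((fooGroups l).items.map (fun p => p.1)).Nodup := by
    rw [hitems, List.map_map, hfst, List.map_id]; exact hnd
  have hxk : x ∈ (fooGroups l).items.map (fun p => p.1) := by
    rw [hitems, List.map_map, hfst, List.map_id, hkeys]
    exact (PySem.Set.mem_ofList l x).mpr hx
  rw [ansLoop_getD _ 1 _ x hndk, if_pos hxk, one_mul, hitems]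
  rw [List.filter_map, List.map_map]
  have hcomp : ((fun p => p.1 != x) ∘ fun k => (k, (fooGroups l).getD k 1))
      = fun k => k != x := rfl
  rw [hcomp]
  have hval : ∀ k ∈ (fooGroups l).keys.filter (fun k => k != x),
      ((fun p => p.2) ∘ fun k => (k, (fooGroups l).getD k 1)) k
        = ((l.filter (fun j => j != x)).filter (fun j => j == k)).prod := by
    intro k hkmem
    simp only [List.mem_filter, bne_iff_ne, ne_eq] at hkmem
    have hgv : (fooGroups l).getD k 1 = (l.filter (fun j => j == k)).prod := by
      unfold fooGroups; rw [groups_getD]; simp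
    have hff : (l.filter (fun j => j != x)).filter (fun j => j == k)
        = l.filter (fun j => j == k) := by
      rw [List.filter_filter]
      apply List.filter_congr
      intro a _
      by_cases ha : a = k
      · simp [ha, hkmem.2]
      · simp [ha]
    simp [hgv, hff]
  rw [List.map_congr_left hval]
  apply prod_groups_cover
  · exact hnd.filter _
  · intro y hy
    simp only [List.mem_filter, bne_iff_ne, ne_eq] at hy
    rw [hkeys]
    simp only [List.mem_filter, bne_iff_ne, ne_eq]
    exact ⟨(PySem.Set.mem_ofList l y).mpr hy.1, hy.2⟩

-- ===== VERDICT (by name: the statement is the Claim_ definition above) =====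
theorem foo_spec : Claim_equal_foo := by
  intro l _
  unfold Spec_foo
  rw [foo_eq, foo_alt_eq]
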